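-- pv_equiv track=rewrite | github.com/plutowang/solves_algorithms | codderbyte/solution.py | VowelSquare
-- ===== SOURCE A (Python) =====
-- def VowelSquare(strArr):
--     """Have the function VowelSquare(strArr) take the strArr parameter being
--     passed which will be a 2D matrix of some arbitrary size filled with
--     letters from the alphabet, and determine if a 2x2 square composed entirely
--     of vowels exists in the matrix. For example: strArr is
--     ["abcd", "eikr", "oufj"]
--     then this matrix looks like the following:
--
--     a b c d
--     e i k r
--     o u f j
--
--     Within this matrix there is a 2x2 square of vowels starting in the second
--     row and first column, namely, ei, ou. If a 2x2 square of vowels is found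
--     your program should return the top-left position (row-column) of
--     the square, so for this example your program should return 1-0.
--     If no 2x2 square of vowels exists, then return the string not found.
--     If there are multiple squares of vowels, return the one that
--     is at the most top-left position in the whole matrix. The input matrix will
--     at least be of size 2x2.
--     """
--     # code goes here
--     vowels = 'aeiou'
--     for i in range(len(strArr) - 1):
--         for j in range(len(strArr[0]) - 1):
--             if strArr[i][j] in vowels \
--                     and strArr[i][j+1] in vowels \
--                     and strArr[i+1][j] in vowels \
--                     and strArr[i+1][j+1] in vowels:
--                 return str(i)+'-'+str(j)
--     return 'not found'
-- ===== SOURCE B (Python) =====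
-- def VowelSquare(strArr):
--     vowels = set('aeiou')
--     n = len(strArr)
--     if n < 2:
--         return 'not found'
--     w = len(strArr[0])
--     # vertical-pair grid: P[i][j] iff strArr[i][j] and strArr[i+1][j] are both vowels
--     P = []
--     for top, bot in zip(strArr, strArr[1:]):
--         P.append([top[j] in vowels and bot[j] in vowels for j in range(w)])
--     for i, row in enumerate(P):
--         for j in range(w - 1):
--             if row[j] and row[j + 1]:
--                 return str(i) + '-' + str(j)
--     return 'not found'
-- ===== Notes on version B (the rewrite author's own statement) =====
-- stated objective: alternative
-- what changed: B first builds a boolean grid of vertical vowel-pairs from zipped adjacent rows, then a second pass returns the first position with two horizontally adjacent trues, instead of A's single nested scan testing all four cells at once.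
-- outside the precondition, e.g. on VowelSquare(['ba', 'z']): A returns 'not found', B raises IndexError; on VowelSquare(['ab', 'a']): A returns 'not found', B returns 'not found'; on VowelSquare(['a', '']): A returns 'not found', B raises IndexError
import Mathlib
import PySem

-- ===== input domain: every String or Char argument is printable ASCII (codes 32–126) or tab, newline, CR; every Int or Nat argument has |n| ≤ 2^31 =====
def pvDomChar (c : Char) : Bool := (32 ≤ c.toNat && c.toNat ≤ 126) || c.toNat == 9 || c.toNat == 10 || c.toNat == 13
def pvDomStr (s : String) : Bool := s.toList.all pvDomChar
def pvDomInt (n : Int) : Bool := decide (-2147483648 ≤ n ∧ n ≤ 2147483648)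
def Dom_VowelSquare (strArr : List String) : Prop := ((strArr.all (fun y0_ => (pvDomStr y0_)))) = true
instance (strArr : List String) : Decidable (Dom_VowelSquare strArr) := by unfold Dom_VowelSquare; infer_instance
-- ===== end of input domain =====

-- B replaces A's one nested four-cell scan with a vertical-pair grid built first and a
-- horizontal-adjacency scan over it (alternative decomposition, same cost).

-- ===== PORT A =====
-- vowels = 'aeiou' (membership of a single cell character)
def vowels_A : List Char := "aeiou".toList

-- strArr[i][j]; out-of-range yields the non-vowel '?' (Python raises there; excluded by Pre_)
def cell_A (strArr : List String) (i j : Int) : Char :=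
  match PySem.List.pyGet? strArr i with
  | none => '?'
  | some s => (PySem.Str.pyGet? s j).getD '?'

-- the four-way condition of A's if, in A's order
def cond_A (strArr : List String) (i j : Int) : Bool :=
  vowels_A.contains (cell_A strArr i j) && vowels_A.contains (cell_A strArr i (j+1)) &&
  vowels_A.contains (cell_A strArr (i+1) j) && vowels_A.contains (cell_A strArr (i+1) (j+1))

-- for j in range(len(strArr[0]) - 1): … return str(i)+'-'+str(j)
def inner_A (strArr : List String) (i : Int) : List Int → Option String
  | [] => none
  | j :: js =>
    if cond_A strArr i j then some (PySem.Int.toStr i ++ "-" ++ PySem.Int.toStr j)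
    else inner_A strArr i js

-- for i in range(len(strArr) - 1): …
def outer_A (strArr : List String) : List Int → Option String
  | [] => none
  | i :: is =>
    match inner_A strArr i (PySem.List.pyRange 0 (((strArr.headD "").toList.length : Int) - 1) 1) with
    | some r => some r
    | none => outer_A strArr is

def VowelSquare (strArr : List String) : String :=
  (outer_A strArr (PySem.List.pyRange 0 ((strArr.length : Int) - 1) 1)).getD "not found"

-- ===== PORT B =====
-- vowels = set('aeiou')
def vowelSet_B : PySem.Set Char := PySem.Set.ofList "aeiou".toList

def isVowel_B (c : Char) : Bool := PySem.Set.contains vowelSet_B c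

-- s[j] for a Nat index; out-of-range yields '?' (Python B raises there; excluded by Pre_)
def charB (s : String) (j : Nat) : Char := s.toList.getD j '?'

-- [top[j] in vowels and bot[j] in vowels for j in range(w)]
def pairRow_B (w : Nat) (top bot : String) : List Bool :=
  (List.range w).map (fun j => isVowel_B (charB top j) && isVowel_B (charB bot j))

-- for j in range(w - 1): if row[j] and row[j+1]: return str(i)+'-'+str(j)
def scanRow_B (i : Nat) (row : List Bool) : List Nat → Option String
  | [] => none
  | j :: js =>
    if row.getD j false && row.getD (j+1) false
    then some (PySem.Int.toStr (i : Int) ++ "-" ++ PySem.Int.toStr (j : Int))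
    else scanRow_B i row js

-- for i, row in enumerate(P): … (the counter i is carried explicitly)
def scan_B (w : Nat) (i : Nat) : List (List Bool) → Option String
  | [] => none
  | row :: rest =>
    match scanRow_B i row (List.range (w - 1)) with
    | some r => some r
    | none => scan_B w (i+1) rest

def VowelSquare_alt (strArr : List String) : String :=
  if strArr.length < 2 then "not found"
  else
    (scan_B ((strArr.headD "").toList.length) 0
      ((strArr.zip strArr.tail).map
        (fun tb => pairRow_B ((strArr.headD "").toList.length) tb.1 tb.2))).getD "not found"

-- ===== PRECONDITION & SPEC =====
-- Pre_ excludes ragged matrices (≥ 2 rows, some row shorter than the first): there both Pythons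
-- index rows by the first row's width and can raise IndexError, and whether each returns instead
-- depends only on short-circuit accidents.
def Pre_VowelSquare (strArr : List String) : Prop :=
  strArr.length ≤ 1 ∨ ∀ s ∈ strArr, (strArr.headD "").toList.length ≤ s.toList.length
instance (strArr : List String) : Decidable (Pre_VowelSquare strArr) := by
  unfold Pre_VowelSquare; infer_instance

def pvWitness_VowelSquare : List String := ["abcd", "eikr", "oufj"]

def Spec_VowelSquare (strArr : List String) (out : String) : Prop := out = VowelSquare_alt strArr
instance (strArr : List String) (out : String) : Decidable (Spec_VowelSquare strArr out) := by
  unfold Spec_VowelSquare; infer_instance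

-- ===== CLAIM (what is proved, stated in full; the proofs are below) =====
def Claim_equal_VowelSquare : Prop := ∀ (strArr : List String), Dom_VowelSquare strArr →
  Pre_VowelSquare strArr → Spec_VowelSquare strArr (VowelSquare strArr)

-- ===== LEMMAS AND PROOFS =====

-- the two vowel tests agree on every character
theorem isVowel_eq (c : Char) : vowels_A.contains c = isVowel_B c := by
  have h : vowelSet_B = vowels_A := by decide
  simp [isVowel_B, h, PySem.Set.contains]

-- the two cell accesses agree on every (Nat) position, defaults included
theorem cell_eq (strArr : List String) (i j : Nat) :
    cell_A strArr (i : Int) (j : Int) = charB (strArr.getD i "") j := by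
  simp only [cell_A, PySem.List.pyGet?_natCast]
  by_cases h : i < strArr.length
  · rw [List.getElem?_eq_getElem h, List.getD_eq_getElem _ _ h]
    simp [PySem.Str.pyGet?_eq, PySem.List.pyGet?_natCast, charB, List.getD]
  · rw [List.getElem?_eq_none (by omega), List.getD_eq_default _ _ (by omega)]
    simp [charB]

-- A's four-cell test equals B's pair of vertical-pair lookups, pointwise
theorem cond_eq (strArr : List String) (w i j : Nat) (hj : j + 1 < w) :
    cond_A strArr (i : Int) (j : Int) =
      ((pairRow_B w (strArr.getD i "") (strArr.getD (i+1) "")).getD j false &&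
       (pairRow_B w (strArr.getD i "") (strArr.getD (i+1) "")).getD (j+1) false) := by
  unfold cond_A pairRow_B
  rw [PySem.List.getD_map_range _ _ _ _ (by omega), PySem.List.getD_map_range _ _ _ _ hj]
  have h1 : ((i : Int) + 1) = ((i + 1 : Nat) : Int) := by push_cast; ring
  have h2 : ((j : Int) + 1) = ((j + 1 : Nat) : Int) := by push_cast; ring
  rw [h1, h2, cell_eq, cell_eq, cell_eq, cell_eq, isVowel_eq, isVowel_eq, isVowel_eq, isVowel_eq]
  cases isVowel_B (charB (strArr.getD i "") j) <;>
    cases isVowel_B (charB (strArr.getD i "") (j+1)) <;>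
    cases isVowel_B (charB (strArr.getD (i+1) "") j) <;>
    cases isVowel_B (charB (strArr.getD (i+1) "") (j+1)) <;> rfl

-- inner loop of A = row scan of B, over any list of in-range column indices
theorem inner_eq (strArr : List String) (w i : Nat) (js : List Nat)
    (h : ∀ j ∈ js, j + 1 < w) :
    inner_A strArr (i : Int) (js.map (fun (j : Nat) => (j : Int))) =
      scanRow_B i (pairRow_B w (strArr.getD i "") (strArr.getD (i+1) "")) js := by
  induction js with
  | nil => rfl
  | cons j js ih =>
    simp only [List.map_cons, inner_A, scanRow_B]
    rw [cond_eq strArr w i j (h j (by simp))]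
    split
    · rfl
    · exact ih (fun x hx => h x (by simp [hx]))

-- range(w-1) as the Int list A iterates
theorem colRange_eq (w : Nat) :
    PySem.List.pyRange 0 ((w : Int) - 1) 1 = (List.range (w - 1)).map (fun (j : Nat) => (j : Int)) := by
  rcases Nat.eq_zero_or_pos w with h | h
  · subst h
    rw [PySem.List.pyRange_one_eq_nil (by norm_num)]
    simp
  · have : ((w : Int) - 1) = ((w - 1 : Nat) : Int) := by omega
    rw [this, PySem.List.pyRange_zero_natCast]

-- outer loop of A over consecutive row indices = B's counter scan over the matching rows
theorem outer_eq (strArr : List String) (m k : Nat) :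
    outer_A strArr ((List.range' k m).map (fun (i : Nat) => (i : Int))) =
      scan_B ((strArr.headD "").toList.length) k
        ((List.range' k m).map (fun t => pairRow_B ((strArr.headD "").toList.length)
          (strArr.getD t "") (strArr.getD (t+1) ""))) := by
  induction m generalizing k with
  | zero => rfl
  | succ m ih =>
    rw [List.range'_succ]
    simp only [List.map_cons, outer_A, scan_B]
    rw [colRange_eq, inner_eq strArr ((strArr.headD "").toList.length) k _
      (fun j hj => by have := List.mem_range.mp hj; omega)]
    cases scanRow_B k (pairRow_B ((strArr.headD "").toList.length) (strArr.getD k "")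
        (strArr.getD (k+1) "")) (List.range ((strArr.headD "").toList.length - 1)) with
    | some r => rfl
    | none => exact ih (k + 1)

-- B's zipped grid is the row-indexed grid
theorem grid_eq (strArr : List String) :
    (strArr.zip strArr.tail).map (fun tb => pairRow_B ((strArr.headD "").toList.length) tb.1 tb.2) =
      (List.range' 0 (strArr.length - 1)).map (fun t =>
        pairRow_B ((strArr.headD "").toList.length) (strArr.getD t "") (strArr.getD (t+1) "")) := by
  apply List.ext_getElem
  · simp [List.length_zip]
  · intro t h1 h2
    have hlen : (strArr.zip strArr.tail).length = strArr.length - 1 := by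
      simp [List.length_zip]
    have ht : t < strArr.length - 1 := by simpa [hlen] using h1
    have ht1 : t < strArr.length := by omega
    have ht2 : t + 1 < strArr.length := by omega
    have htt : t < strArr.tail.length := by simp [List.length_tail]; omega
    simp only [List.getElem_map, List.getElem_zip, List.getElem_range']
    have e : 0 + 1 * t = t := by ring
    rw [e, List.getD_eq_getElem _ _ ht1, List.getD_eq_getElem _ _ ht2, List.getElem_tail]

-- the length range A iterates, as Nat indices
theorem rowRange_eq (strArr : List String) :
    PySem.List.pyRange 0 ((strArr.length : Int) - 1) 1 =
      (List.range' 0 (strArr.length - 1)).map (fun (i : Nat) => (i : Int)) := by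
  rw [colRange_eq strArr.length, List.range_eq_range']

theorem ports_eq (strArr : List String) : VowelSquare strArr = VowelSquare_alt strArr := by
  unfold VowelSquare VowelSquare_alt
  by_cases h : strArr.length < 2
  · have : PySem.List.pyRange 0 ((strArr.length : Int) - 1) 1 = [] :=
      PySem.List.pyRange_one_eq_nil (by omega)
    rw [this]
    simp [outer_A, h]
  · rw [rowRange_eq, outer_eq, grid_eq]
    simp [h]

-- ===== VERDICT (by name: the statement is the Claim_ definition above) =====
theorem VowelSquare_spec : Claim_equal_VowelSquare := by
  intro strArr _ _
  unfold Spec_VowelSquare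
  exact ports_eq strArr
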